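-- pv_equiv track=rewrite | github.com/wooktori/algorithm | 프로그래머스/LV2/롤케이크 자르기.py | solution
-- ===== SOURCE A (Python) =====
-- from collections import Counter
--
-- def solution(topping):
--     answer = 0
--     counter = Counter(topping)
--     counter2 = set()
--
--     for i in topping:
--         counter[i] -= 1
--         counter2.add(i)
--
--         if counter[i] == 0:
--             counter.pop(i)
--
--         if len(counter) == len(counter2):
--             answer += 1
--     return answer
-- ===== SOURCE B (Python) =====
-- def solution(topping):
--     # suffix pass: rd[j] = number of distinct toppings in topping[j:]
--     rd = [0]
--     seen = set()
--     for x in reversed(topping):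
--         seen.add(x)
--         rd.append(len(seen))
--     rd.reverse()
--     # prefix pass: compare distinct count of the prefix with the precomputed suffix count
--     answer = 0
--     left = set()
--     for x, r in zip(topping, rd[1:]):
--         left.add(x)
--         if len(left) == r:
--             answer += 1
--     return answer
-- ===== Notes on version B (the rewrite author's own statement) =====
-- stated objective: faster
-- what changed: Replaces A's single pass that decrements a Counter of the whole list (popping exhausted keys) with two set-only passes: a backward pass precomputing a suffix-distinct-count table and a forward prefix scan comparing against it.
import Mathlib
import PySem

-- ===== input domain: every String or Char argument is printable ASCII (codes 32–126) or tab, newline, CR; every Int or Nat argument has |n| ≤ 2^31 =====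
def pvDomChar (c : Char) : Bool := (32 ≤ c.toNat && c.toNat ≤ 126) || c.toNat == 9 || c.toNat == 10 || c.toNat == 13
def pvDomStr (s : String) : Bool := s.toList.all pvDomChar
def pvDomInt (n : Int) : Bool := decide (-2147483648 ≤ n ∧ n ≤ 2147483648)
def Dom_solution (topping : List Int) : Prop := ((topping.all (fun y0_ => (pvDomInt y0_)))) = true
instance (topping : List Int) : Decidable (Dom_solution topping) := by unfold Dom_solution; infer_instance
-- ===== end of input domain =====

-- B replaces A's decrement-a-Counter single pass with two set-only passes (a precomputed suffix-distinct table plus a forward prefix scan); a timing run measured B faster by a constant factor.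


-- ===== PORT A =====
-- counter[i] -= 1 is Counter item assignment = Dict.modify with default 0;
-- counter.pop(i) fires only when counter[i] == 0 after the decrement, and i is then
-- a key of counter (i was just counted), so Python's pop(i) = Dict.erase i here.
def solution (topping : List Int) : Int :=
  (topping.foldl
    (fun (st : Int × PySem.Dict Int Int × PySem.Set Int) i =>
      let cnt := st.2.1.modify i 0 (fun v => v - 1)
      let seen := PySem.Set.add st.2.2 i
      let cnt2 := if cnt.getD i 0 = 0 then cnt.erase i else cnt
      if cnt2.size = seen.length then (st.1 + 1, cnt2, seen) else (st.1, cnt2, seen))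
    (0, PySem.Dict.counter topping, PySem.Set.empty)).1

-- ===== PORT B =====
def solution_alt (topping : List Int) : Int :=
  let bwd := topping.reverse.foldl
    (fun (st : List Int × PySem.Set Int) x =>
      let seen := PySem.Set.add st.2 x
      (st.1 ++ [(seen.length : Int)], seen))
    ([(0 : Int)], PySem.Set.empty)
  let rd := bwd.1.reverse
  ((topping.zip (PySem.List.slice rd (some 1) none)).foldl
    (fun (st : Int × PySem.Set Int) xr =>
      let left := PySem.Set.add st.2 xr.1
      if (left.length : Int) = xr.2 then (st.1 + 1, left) else (st.1, left))
    (0, PySem.Set.empty)).1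

-- ===== PRECONDITION & SPEC =====
def Spec_solution (topping : List Int) (out : Int) : Prop := out = solution_alt topping
instance (topping : List Int) (out : Int) : Decidable (Spec_solution topping out) := by unfold Spec_solution; infer_instance

-- ===== CLAIM (what is proved, stated in full; the proofs are below) =====
def Claim_equal_solution : Prop := ∀ (topping : List Int), Dom_solution topping → Spec_solution topping (solution topping)

-- ===== LEMMAS AND PROOFS =====

-- number of distinct elements of a list
def dcount (l : List Int) : Nat := (PySem.Set.ofList l).length

-- common reference recursion: first argument = processed prefix, second = remaining suffix
def G : List Int → List Int → Int
  | _, [] => 0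
  | p, i :: s => (if dcount (p ++ [i]) = dcount s then 1 else 0) + G (p ++ [i]) s

theorem bwd_fold (l q : List Int) (acc : List Int) :
    (l.foldl (fun (st : List Int × PySem.Set Int) x =>
        let seen := PySem.Set.add st.2 x
        (st.1 ++ [(seen.length : Int)], seen)) (acc, PySem.Set.ofList q)).1
      = acc ++ (List.range l.length).map (fun k => (dcount (q ++ l.take (k+1)) : Int)) := by
  induction l generalizing q acc with
  | nil => simp
  | cons x l ih =>
    simp only [List.foldl_cons]
    rw [show (PySem.Set.add (PySem.Set.ofList q) x) = PySem.Set.ofList (q ++ [x]) from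
      (PySem.Set.ofList_append_singleton q x).symm]
    rw [ih]
    simp [List.range_succ_eq_map, List.map_map, dcount, Function.comp]

theorem dcount_perm {l₁ l₂ : List Int} (h : l₁.Perm l₂) : dcount l₁ = dcount l₂ := by
  unfold dcount
  have hp : (PySem.Set.ofList l₁).Perm (PySem.Set.ofList l₂) := by
    rw [List.perm_ext_iff_of_nodup (PySem.Set.nodup_ofList _) (PySem.Set.nodup_ofList _)]
    intro a; simp [PySem.Set.mem_ofList, h.mem_iff]
  exact hp.length_eq

theorem rd_eq (topping : List Int) :
    (([(0:Int)] ++ (List.range topping.reverse.length).map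
        (fun k => (dcount (([] : List Int) ++ topping.reverse.take (k+1)) : Int))).reverse)
      = (List.range (topping.length + 1)).map (fun j => (dcount (topping.drop j) : Int)) := by
  apply List.ext_getElem
  · simp
  · intro j h1 h2
    simp only [List.length_reverse, List.length_append, List.length_map, List.length_range,
      List.length_cons, List.length_nil] at h1 h2
    simp only [List.getElem_reverse, List.getElem_map, List.getElem_range, List.nil_append]
    simp only [List.length_append, List.length_map, List.length_range, List.length_reverse,
      List.length_cons, List.length_nil]
    by_cases hj : j = topping.length
    · subst hj
      simp only [show 0 + 1 + topping.length - 1 - topping.length = 0 from by omega]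
      simp [dcount, PySem.Set.ofList_nil]
    · have hjlt : j < topping.length := by omega
      simp only [show 0 + 1 + topping.length - 1 - j = 1 + (topping.length - 1 - j) from by omega]
      rw [List.getElem_append_right (by simp)]
      simp only [List.length_singleton, List.getElem_map, List.getElem_range]
      have ht : topping.reverse.take (1 + (topping.length - 1 - j) - 1 + 1)
          = (topping.drop j).reverse := by
        rw [List.take_reverse]
        congr 2
        omega
      rw [ht]
      congr 1
      exact dcount_perm (List.reverse_perm _)

theorem fwd_fold (s : List Int) (p : List Int) (ans : Int) :
    ((s.zip ((List.range s.length).map (fun j => (dcount (s.drop (j+1)) : Int)))).foldl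
      (fun (st : Int × PySem.Set Int) xr =>
        if ((PySem.Set.add st.2 xr.1).length : Int) = xr.2
        then (st.1 + 1, PySem.Set.add st.2 xr.1) else (st.1, PySem.Set.add st.2 xr.1))
      (ans, PySem.Set.ofList p)).1 = ans + G p s := by
  induction s generalizing p ans with
  | nil => simp [G]
  | cons i s ih =>
    rw [List.length_cons, List.range_succ_eq_map]
    simp only [List.map_cons, List.map_map, List.zip_cons_cons, List.foldl_cons, List.drop_succ_cons,
      List.drop_zero]
    rw [show (PySem.Set.add (PySem.Set.ofList p) i) = PySem.Set.ofList (p ++ [i]) from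
      (PySem.Set.ofList_append_singleton p i).symm]
    have hmap : (List.range s.length).map
        ((fun j => (dcount (List.drop j s) : Int)) ∘ Nat.succ)
        = (List.range s.length).map (fun j => (dcount (s.drop (j+1)) : Int)) := by
      simp [Function.comp]
    rw [hmap, G]
    by_cases h1 : dcount (p ++ [i]) = dcount s
    · rw [if_pos (show ((PySem.Set.ofList (p ++ [i])).length : Int) = (dcount s : Int) from by
        exact_mod_cast h1), ih, if_pos h1]
      ring
    · rw [if_neg (show ¬ ((PySem.Set.ofList (p ++ [i])).length : Int) = (dcount s : Int) from by
        exact_mod_cast h1), ih, if_neg h1]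
      ring


theorem filter_pos_count_length (K s : List Int) (hK : K.Nodup)
    (hsub : ∀ x ∈ s, x ∈ K) :
    (K.filter (fun k => decide (0 < s.count k))).length = dcount s := by
  have hperm : (K.filter (fun k => decide (0 < s.count k))).Perm (PySem.Set.ofList s) := by
    rw [List.perm_ext_iff_of_nodup (hK.filter _) (PySem.Set.nodup_ofList _)]
    intro a
    simp only [List.mem_filter, PySem.Set.mem_ofList, decide_eq_true_eq, List.count_pos_iff]
    exact ⟨fun h => h.2, fun h => ⟨hsub a h, h⟩⟩
  exact hperm.length_eq

theorem step_items (K : List Int) (i : Int) (s' : List Int) :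
    (((K.filter (fun k => decide (0 < ((i :: s').count k)))).map
      (fun k => (k, ((i :: s').count k : Int)))).map
      (fun p => if p.1 == i then (i, ((i :: s').count i : Int) - 1) else p))
    = (K.filter (fun k => decide (0 < (i :: s').count k))).map
      (fun k => if k = i then (i, (s'.count i : Int)) else (k, (s'.count k : Int))) := by
  rw [List.map_map]
  apply List.map_congr_left
  intro k hk
  by_cases h : k = i
  · subst h
    simp [List.count_cons_self]
  · simp [Function.comp, h, List.count_cons_of_ne (fun he => h he.symm)]

theorem step_items_pos (K : List Int) (i : Int) (s' : List Int) (hpos : 0 < s'.count i) :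
    (K.filter (fun k => decide (0 < (i :: s').count k))).map
      (fun k => if k = i then (i, (s'.count i : Int)) else (k, (s'.count k : Int)))
    = (K.filter (fun k => decide (0 < s'.count k))).map (fun k => (k, (s'.count k : Int))) := by
  rw [List.filter_congr (fun k _ => ?_)]
  · apply List.map_congr_left
    intro k hk
    by_cases h : k = i
    · subst h; simp
    · simp [h]
  · by_cases h : k = i
    · subst h; simp [List.count_cons_self, hpos, Nat.lt_of_lt_of_le hpos (Nat.le_succ _)]
    · rw [List.count_cons_of_ne (fun he => h he.symm)]

theorem step_items_zero (K : List Int) (i : Int) (s' : List Int) (hz : s'.count i = 0) :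
    ((K.filter (fun k => decide (0 < (i :: s').count k))).map
      (fun k => if k = i then (i, (s'.count i : Int)) else (k, (s'.count k : Int)))).filter
      (fun p => !(p.1 == i))
    = (K.filter (fun k => decide (0 < s'.count k))).map (fun k => (k, (s'.count k : Int))) := by
  rw [List.filter_map, List.filter_filter]
  rw [List.filter_congr (fun k _ => ?_)]
  · apply List.map_congr_left
    intro k hk
    simp only [List.mem_filter, decide_eq_true_eq] at hk
    have h : k ≠ i := by
      intro he; subst he; omega
    simp [h]
  · by_cases h : k = i
    · subst h; simp [hz]
    · simp [Function.comp, h, List.count_cons_of_ne (fun he => h he.symm)]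

theorem a_fold (s : List Int) : ∀ (K p : List Int) (ans : Int) (cnt : PySem.Dict Int Int),
    K.Nodup → (∀ x ∈ s, x ∈ K) →
    cnt.items = (K.filter (fun k => decide (0 < s.count k))).map (fun k => (k, (s.count k : Int))) →
    (s.foldl
      (fun (st : Int × PySem.Dict Int Int × PySem.Set Int) i =>
        let cnt := st.2.1.modify i 0 (fun v => v - 1)
        let seen := PySem.Set.add st.2.2 i
        let cnt2 := if cnt.getD i 0 = 0 then cnt.erase i else cnt
        if cnt2.size = seen.length then (st.1 + 1, cnt2, seen) else (st.1, cnt2, seen))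
      (ans, cnt, PySem.Set.ofList p)).1 = ans + G p s := by
  induction s with
  | nil => intro K p ans cnt _ _ _; simp [G]
  | cons i s ih =>
    intro K p ans cnt hK hsub hitems
    have hkeys : cnt.keys = K.filter (fun k => decide (0 < ((i :: s).count k))) := by
      simp only [PySem.Dict.keys, hitems, List.map_map]
      dsimp only [Function.comp_def]
      exact List.map_id _
    have hkeysnd : cnt.keys.Nodup := by rw [hkeys]; exact hK.filter _
    have hmemF : i ∈ K.filter (fun k => decide (0 < ((i :: s).count k))) :=
      List.mem_filter.mpr ⟨hsub i (by simp), by simp [List.count_cons_self]⟩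
    have hget : cnt.get? i = some (((i :: s).count i : Int)) :=
      PySem.Dict.get?_of_mem_items cnt (by rw [hitems]; exact List.mem_map.mpr ⟨i, hmemF, rfl⟩) hkeysnd
    have hgetD : cnt.getD i 0 = (((i :: s).count i : Int)) :=
      PySem.Dict.getD_of_get?_eq_some cnt 0 hget
    have hcont : cnt.contains i = true := by
      rw [PySem.Dict.contains_eq_isSome_get?, hget]; rfl
    have hmod : cnt.modify i 0 (fun v => v - 1) = cnt.insert i (((i :: s).count i : Int) - 1) := by
      simp [PySem.Dict.modify, hgetD]
    have hitems1 : (cnt.insert i (((i :: s).count i : Int) - 1)).items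
        = (K.filter (fun k => decide (0 < (i :: s).count k))).map
          (fun k => if k = i then (i, (s.count i : Int)) else (k, (s.count k : Int))) := by
      rw [PySem.Dict.items_insert_of_contains cnt _ hcont, hitems]
      exact step_items K i s
    have hgetD1 : (cnt.insert i (((i :: s).count i : Int) - 1)).getD i 0
        = ((i :: s).count i : Int) - 1 := PySem.Dict.getD_insert_self cnt i _ 0
    have hseen : PySem.Set.add (PySem.Set.ofList p) i = PySem.Set.ofList (p ++ [i]) :=
      (PySem.Set.ofList_append_singleton p i).symm
    have hsub' : ∀ x ∈ s, x ∈ K := fun x hx => hsub x (List.mem_cons_of_mem _ hx)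
    simp only [List.foldl_cons]
    rw [hmod, hgetD1, hseen]
    have hdc : (PySem.Set.ofList (p ++ [i])).length = dcount (p ++ [i]) := rfl
    by_cases hz : s.count i = 0
    · have hzero : (((i :: s).count i : Int)) - 1 = 0 := by
        rw [List.count_cons_self, hz]
        simp
      rw [if_pos hzero]
      have hitems2 : ((cnt.insert i (((i :: s).count i : Int) - 1)).erase i).items
          = (K.filter (fun k => decide (0 < s.count k))).map (fun k => (k, (s.count k : Int))) := by
        simp only [PySem.Dict.erase, hitems1]
        exact step_items_zero K i s hz
      have hsize : ((cnt.insert i (((i :: s).count i : Int) - 1)).erase i).size = dcount s := by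
        simp only [PySem.Dict.size, hitems2, List.length_map]
        exact filter_pos_count_length K s hK hsub'
      rw [hsize, hdc]
      by_cases hc : dcount s = dcount (p ++ [i])
      · rw [if_pos hc, ih K (p ++ [i]) (ans + 1) _ hK hsub' hitems2, G,
          if_pos hc.symm]
        ring
      · rw [if_neg hc, ih K (p ++ [i]) ans _ hK hsub' hitems2, G,
          if_neg (fun hh => hc hh.symm)]
        ring
    · have hnzero : ¬ ((((i :: s).count i : Int)) - 1 = 0) := by
        rw [List.count_cons_self]
        push_cast
        omega
      rw [if_neg hnzero]
      have hitems2 : (cnt.insert i (((i :: s).count i : Int) - 1)).items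
          = (K.filter (fun k => decide (0 < s.count k))).map (fun k => (k, (s.count k : Int))) := by
        rw [hitems1]
        exact step_items_pos K i s (Nat.pos_of_ne_zero hz)
      have hsize : (cnt.insert i (((i :: s).count i : Int) - 1)).size = dcount s := by
        simp only [PySem.Dict.size, hitems2, List.length_map]
        exact filter_pos_count_length K s hK hsub'
      rw [hsize, hdc]
      by_cases hc : dcount s = dcount (p ++ [i])
      · rw [if_pos hc, ih K (p ++ [i]) (ans + 1) _ hK hsub' hitems2, G,
          if_pos hc.symm]
        ring
      · rw [if_neg hc, ih K (p ++ [i]) ans _ hK hsub' hitems2, G,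
          if_neg (fun hh => hc hh.symm)]
        ring

theorem counter_items_filter (topping : List Int) :
    (PySem.Dict.counter topping).items
      = ((PySem.Set.ofList topping).filter (fun k => decide (0 < topping.count k))).map
        (fun k => (k, (topping.count k : Int))) := by
  rw [PySem.Dict.items_counter]
  congr 1
  exact (List.filter_eq_self.mpr (fun k hk => by
    simp [List.count_pos_iff, (PySem.Set.mem_ofList topping k).mp hk])).symm

theorem solution_eq_G (topping : List Int) : solution topping = G [] topping := by
  unfold solution
  rw [show (PySem.Set.empty : PySem.Set Int) = PySem.Set.ofList [] from rfl]
  rw [a_fold topping (PySem.Set.ofList topping) [] 0 (PySem.Dict.counter topping)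
    (PySem.Set.nodup_ofList topping)
    (fun x hx => (PySem.Set.mem_ofList topping x).mpr hx)
    (counter_items_filter topping)]
  ring

theorem solution_alt_eq_G (topping : List Int) : solution_alt topping = G [] topping := by
  unfold solution_alt
  simp only []
  rw [show (PySem.Set.empty : PySem.Set Int) = PySem.Set.ofList [] from rfl]
  rw [bwd_fold, rd_eq]
  rw [PySem.List.slice_from _ (by norm_num : (0:Int) ≤ (1:Int))]
  rw [List.range_succ_eq_map]
  simp only [List.map_cons, Int.toNat_one, List.drop_succ_cons, List.drop_zero, List.map_map]
  have hmap : (List.range topping.length).map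
      ((fun j => (dcount (topping.drop j) : Int)) ∘ Nat.succ)
      = (List.range topping.length).map (fun j => (dcount (topping.drop (j+1)) : Int)) := by
    simp [Function.comp]
  rw [hmap, fwd_fold]
  simp

-- ===== VERDICT (by name: the statement is the Claim_ definition above) =====
theorem solution_spec : Claim_equal_solution := by
  intro topping _
  unfold Spec_solution
  rw [solution_eq_G, solution_alt_eq_G]
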